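-- pv_equiv track=rewrite | github.com/weijie-dong/Verification-of-Diagnosability-for-Cyber-Physical-Systems-A-Hybrid-Barrier-Certificate-Approach | final case/V-function-1/main.py | gridinput
-- ===== SOURCE A (Python) =====
-- def gridinput(U, size):
--     low0 = U[0]
--     low1 = U[0]
--     low2 = U[0]
--     low3 = U[0]
--     l = []
--     while (low0 <= U[1] - size):
--         # Reset low2
--         low1 = U[0]
--         while (low1 <= U[1] - size):
--             # Reset low3
--             low2 = U[0]
--             while (low2 <= U[1] - size):
--                 # Reset low4
--                 low3 = U[0]
--                 while (low3 <= U[1] - size):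
--                     l.append([low0, low1, low2, low3])
--                     low3 = low3 + size
--                 low2 = low2 + size
--             low1 = low1 + size
--         low0 = low0 + size
--     return l
-- ===== SOURCE B (Python) =====
-- def gridinput(U, size):
--     # Build the 1D grid once (same += accumulation as the original).
--     g = []
--     x = U[0]
--     while x <= U[1] - size:
--         g.append(x)
--         x += size
--     # Single flat loop: decode each index k in 0..n**4-1 in mixed radix n
--     # into the four coordinate indices (most significant digit first, which
--     # matches the outer-to-inner loop order of the original).
--     n = len(g)
--     out = []
--     for k in range(n ** 4):
--         k3 = k % n
--         k //= n
--         k2 = k % n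
--         k //= n
--         k1 = k % n
--         k0 = k // n
--         out.append([g[k0], g[k1], g[k2], g[k3]])
--     return out
-- ===== Notes on version B (the rewrite author's own statement) =====
-- stated objective: alternative
-- what changed: B replaces the four nested while loops by one precomputed 1D grid plus a single flat loop over 0..n**4-1 that decodes each index in mixed radix n into the four coordinates.
import Mathlib
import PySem

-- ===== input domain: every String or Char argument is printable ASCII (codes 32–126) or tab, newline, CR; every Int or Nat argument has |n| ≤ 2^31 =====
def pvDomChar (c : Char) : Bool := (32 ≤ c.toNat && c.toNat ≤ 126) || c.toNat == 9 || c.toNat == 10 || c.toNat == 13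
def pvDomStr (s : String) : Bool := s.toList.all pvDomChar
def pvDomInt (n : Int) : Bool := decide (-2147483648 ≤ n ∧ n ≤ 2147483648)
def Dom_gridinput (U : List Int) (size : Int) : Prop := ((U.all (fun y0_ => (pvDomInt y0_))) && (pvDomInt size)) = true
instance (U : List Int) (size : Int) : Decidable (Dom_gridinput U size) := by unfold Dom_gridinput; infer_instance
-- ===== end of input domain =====

-- B precomputes the 1D grid once and enumerates a single flat index range 0..n^4-1,
-- decoding each index in mixed radix n into the four coordinates, replacing A's four
-- nested while loops (objective: alternative).

-- ===== PORT A =====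
-- A's four nested while loops, one helper per nesting level; the `0 < size` guard only
-- makes the recursion total on inputs where the Python while loop would never terminate
-- (excluded by Pre_gridinput).
def gridA3 (low0 low1 low2 low hi size : Int) : List (List Int) :=
  if low ≤ hi then
    if 0 < size then [low0, low1, low2, low] :: gridA3 low0 low1 low2 (low + size) hi size
    else []
  else []
termination_by (hi + 1 - low).toNat
decreasing_by omega

def gridA2 (start low0 low1 low hi size : Int) : List (List Int) :=
  if low ≤ hi then
    if 0 < size then gridA3 low0 low1 low start hi size ++ gridA2 start low0 low1 (low + size) hi size
    else []
  else []
termination_by (hi + 1 - low).toNat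
decreasing_by omega

def gridA1 (start low0 low hi size : Int) : List (List Int) :=
  if low ≤ hi then
    if 0 < size then gridA2 start low0 low start hi size ++ gridA1 start low0 (low + size) hi size
    else []
  else []
termination_by (hi + 1 - low).toNat
decreasing_by omega

def gridA0 (start low hi size : Int) : List (List Int) :=
  if low ≤ hi then
    if 0 < size then gridA1 start low start hi size ++ gridA0 start (low + size) hi size
    else []
  else []
termination_by (hi + 1 - low).toNat
decreasing_by omega

def gridinput (U : List Int) (size : Int) : List (List Int) :=
  let u0 := (PySem.List.pyGet? U 0).getD 0
  let u1 := (PySem.List.pyGet? U 1).getD 0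
  gridA0 u0 u0 (u1 - size) size

-- ===== PORT B =====
-- the single 1D-grid while loop of Source B (same `0 < size` totality guard)
def grid1 (low hi size : Int) : List Int :=
  if low ≤ hi then
    if 0 < size then low :: grid1 (low + size) hi size
    else []
  else []
termination_by (hi + 1 - low).toNat
decreasing_by omega

-- Source B's flat loop over range(n**4) with mixed-radix-n index decoding; the
-- nonnegative Python ints k, n are represented as Nat, on which % and / agree
-- with Python's % and //.
def gridinput_alt (U : List Int) (size : Int) : List (List Int) :=
  let u0 := (PySem.List.pyGet? U 0).getD 0
  let u1 := (PySem.List.pyGet? U 1).getD 0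
  let g := grid1 u0 (u1 - size) size
  let n := g.length
  (List.range (n ^ 4)).map (fun k =>
    let k3 := k % n
    let k := k / n
    let k2 := k % n
    let k := k / n
    let k1 := k % n
    let k0 := k / n
    [g.getD k0 0, g.getD k1 0, g.getD k2 0, g.getD k3 0])

-- ===== PRECONDITION & SPEC =====
-- Pre_ excludes inputs on which the Python A raises (U shorter than 2: IndexError) or
-- diverges (size ≤ 0 while U[0] ≤ U[1] - size: the while loops never terminate).
def Pre_gridinput (U : List Int) (size : Int) : Prop :=
  2 ≤ U.length ∧
    (0 < size ∨ (PySem.List.pyGet? U 1).getD 0 - size < (PySem.List.pyGet? U 0).getD 0)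
instance (U : List Int) (size : Int) : Decidable (Pre_gridinput U size) := by
  unfold Pre_gridinput; infer_instance

def pvWitness_gridinput : List Int × Int := ([0, 2], 1)

def Spec_gridinput (U : List Int) (size : Int) (out : List (List Int)) : Prop := out = gridinput_alt U size
instance (U : List Int) (size : Int) (out : List (List Int)) : Decidable (Spec_gridinput U size out) := by unfold Spec_gridinput; infer_instance

-- ===== CLAIM (what is proved, stated in full; the proofs are below) =====
def Claim_equal_gridinput : Prop := ∀ (U : List Int) (size : Int), Dom_gridinput U size → Pre_gridinput U size → Spec_gridinput U size (gridinput U size)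

-- ===== LEMMAS AND PROOFS =====
theorem grid1_cons {low hi size : Int} (h1 : low ≤ hi) (h2 : 0 < size) :
    grid1 low hi size = low :: grid1 (low + size) hi size := by
  rw [grid1, if_pos h1, if_pos h2]

theorem grid1_nil_pos {low hi size : Int} (h1 : low ≤ hi) (h2 : ¬ 0 < size) :
    grid1 low hi size = [] := by
  rw [grid1, if_pos h1, if_neg h2]

theorem grid1_nil {low hi size : Int} (h1 : ¬ low ≤ hi) :
    grid1 low hi size = [] := by
  rw [grid1, if_neg h1]

-- A's nested loops compute the 4-fold product of the 1D grid
theorem gridA3_eq (low0 low1 low2 low hi size : Int) :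
    gridA3 low0 low1 low2 low hi size = (grid1 low hi size).map (fun d => [low0, low1, low2, d]) := by
  fun_induction gridA3 low0 low1 low2 low hi size with
  | case1 low h1 h2 ih => rw [grid1_cons h1 h2]; simp [ih]
  | case2 low h1 h2 => rw [grid1_nil_pos h1 h2]; simp
  | case3 low h1 => rw [grid1_nil h1]; simp

theorem gridA2_eq (start low0 low1 low hi size : Int) :
    gridA2 start low0 low1 low hi size =
      (grid1 low hi size).flatMap (fun c => (grid1 start hi size).map (fun d => [low0, low1, c, d])) := by
  fun_induction gridA2 start low0 low1 low hi size with
  | case1 low h1 h2 ih => rw [grid1_cons h1 h2]; simp [ih, gridA3_eq]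
  | case2 low h1 h2 => rw [grid1_nil_pos h1 h2]; simp
  | case3 low h1 => rw [grid1_nil h1]; simp

theorem gridA1_eq (start low0 low hi size : Int) :
    gridA1 start low0 low hi size =
      (grid1 low hi size).flatMap (fun b => (grid1 start hi size).flatMap
        (fun c => (grid1 start hi size).map (fun d => [low0, b, c, d]))) := by
  fun_induction gridA1 start low0 low hi size with
  | case1 low h1 h2 ih => rw [grid1_cons h1 h2]; simp [ih, gridA2_eq]
  | case2 low h1 h2 => rw [grid1_nil_pos h1 h2]; simp
  | case3 low h1 => rw [grid1_nil h1]; simp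

theorem gridA0_eq (start low hi size : Int) :
    gridA0 start low hi size =
      (grid1 low hi size).flatMap (fun a => (grid1 start hi size).flatMap
        (fun b => (grid1 start hi size).flatMap
          (fun c => (grid1 start hi size).map (fun d => [a, b, c, d])))) := by
  fun_induction gridA0 start low hi size with
  | case1 low h1 h2 ih => rw [grid1_cons h1 h2]; simp [ih, gridA1_eq]
  | case2 low h1 h2 => rw [grid1_nil_pos h1 h2]; simp
  | case3 low h1 => rw [grid1_nil h1]; simp

-- B's flat index loop equals the 4-fold product of the grid:
-- peeling the least significant radix-m digit off a flat index range
theorem flatMap_range_mul {α : Type} (a m : Nat) (f : Nat → Nat → List α) :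
    (List.range (a * m)).flatMap (fun k => f (k / m) (k % m)) =
      (List.range a).flatMap (fun i => (List.range m).flatMap (fun j => f i j)) := by
  induction a with
  | zero => simp
  | succ a ih =>
    rw [Nat.succ_mul, List.range_add, List.flatMap_append, ih, List.range_succ,
      List.flatMap_append, List.flatMap_map]
    congr 1
    simp only [List.flatMap_cons, List.flatMap_nil, List.append_nil]
    apply List.flatMap_congr
    intro j hj
    have hm : j < m := List.mem_range.mp hj
    have e : a * m + j = j + m * a := by ring
    have h1 : (a * m + j) / m = a := by
      rw [e, Nat.add_mul_div_left _ _ (Nat.pos_of_ne_zero (by omega)), Nat.div_eq_of_lt hm, Nat.zero_add]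
    have h2 : (a * m + j) % m = j := by
      rw [e, Nat.add_mul_mod_self_left, Nat.mod_eq_of_lt hm]
    simp [h1, h2]

theorem flatMap_range_getD {α : Type} (g : List Int) (h : Int → List α) :
    (List.range g.length).flatMap (fun i => h (g.getD i 0)) = g.flatMap h := by
  induction g with
  | nil => simp
  | cons x gs ih =>
    rw [List.length_cons, List.range_succ_eq_map, List.flatMap_cons, List.flatMap_map]
    simp only [List.getD_cons_zero, List.getD_cons_succ]
    rw [List.flatMap_cons]
    exact congrArg _ ih

theorem map_singleton_flatMap {α β : Type} (l : List α) (f : α → β) :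
    l.flatMap (fun x => [f x]) = l.map f := by
  induction l with
  | nil => rfl
  | cons x xs ih => simp [List.flatMap_cons, ih]

theorem decode_eq (g : List Int) :
    (List.range (g.length ^ 4)).map (fun k =>
       [g.getD (k / g.length / g.length / g.length) 0,
        g.getD (k / g.length / g.length % g.length) 0,
        g.getD (k / g.length % g.length) 0,
        g.getD (k % g.length) 0]) =
    g.flatMap (fun a => g.flatMap (fun b => g.flatMap (fun c => g.map (fun d => [a,b,c,d])))) := by
  calc
    (List.range (g.length ^ 4)).map (fun k =>
       [g.getD (k / g.length / g.length / g.length) 0,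
        g.getD (k / g.length / g.length % g.length) 0,
        g.getD (k / g.length % g.length) 0,
        g.getD (k % g.length) 0])
      = (List.range (g.length ^ 4)).flatMap (fun k =>
       [[g.getD (k / g.length / g.length / g.length) 0,
        g.getD (k / g.length / g.length % g.length) 0,
        g.getD (k / g.length % g.length) 0,
        g.getD (k % g.length) 0]]) := (map_singleton_flatMap _ _).symm
    _ = (List.range (g.length ^ 3)).flatMap (fun q => (List.range g.length).flatMap (fun r =>
          [[g.getD (q / g.length / g.length) 0, g.getD (q / g.length % g.length) 0,
            g.getD (q % g.length) 0, g.getD r 0]])) := by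
        rw [pow_succ]; exact flatMap_range_mul (g.length^3) g.length (fun q r =>
          [[g.getD (q / g.length / g.length) 0, g.getD (q / g.length % g.length) 0,
            g.getD (q % g.length) 0, g.getD r 0]])
    _ = (List.range (g.length ^ 2)).flatMap (fun p => (List.range g.length).flatMap (fun c =>
          (List.range g.length).flatMap (fun r =>
          [[g.getD (p / g.length) 0, g.getD (p % g.length) 0, g.getD c 0, g.getD r 0]]))) := by
        rw [pow_succ]; exact flatMap_range_mul (g.length^2) g.length (fun p c =>
          (List.range g.length).flatMap (fun r =>
          [[g.getD (p / g.length) 0, g.getD (p % g.length) 0, g.getD c 0, g.getD r 0]]))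
    _ = (List.range g.length).flatMap (fun a => (List.range g.length).flatMap (fun b =>
          (List.range g.length).flatMap (fun c => (List.range g.length).flatMap (fun r =>
          [[g.getD a 0, g.getD b 0, g.getD c 0, g.getD r 0]])))) := by
        rw [pow_succ, pow_one]; exact flatMap_range_mul g.length g.length (fun a b =>
          (List.range g.length).flatMap (fun c => (List.range g.length).flatMap (fun r =>
          [[g.getD a 0, g.getD b 0, g.getD c 0, g.getD r 0]])))
    _ = g.flatMap (fun a => g.flatMap (fun b => g.flatMap (fun c => g.map (fun d => [a,b,c,d])))) := by
        have L1 : ∀ a b c : Int,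
            (List.range g.length).flatMap (fun r => [[a, b, c, g.getD r 0]]) =
            g.map (fun d => [a, b, c, d]) := by
          intro a b c
          rw [flatMap_range_getD g (fun d => [[a, b, c, d]]), map_singleton_flatMap]
        have L2 : ∀ a b : Int,
            (List.range g.length).flatMap (fun c => (List.range g.length).flatMap (fun r =>
              [[a, b, g.getD c 0, g.getD r 0]])) =
            g.flatMap (fun c => g.map (fun d => [a, b, c, d])) := by
          intro a b
          rw [flatMap_range_getD g (fun c => (List.range g.length).flatMap (fun r =>
            [[a, b, c, g.getD r 0]]))]
          exact List.flatMap_congr (fun c _ => L1 a b c)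
        have L3 : ∀ a : Int,
            (List.range g.length).flatMap (fun b => (List.range g.length).flatMap (fun c =>
              (List.range g.length).flatMap (fun r => [[a, g.getD b 0, g.getD c 0, g.getD r 0]]))) =
            g.flatMap (fun b => g.flatMap (fun c => g.map (fun d => [a, b, c, d]))) := by
          intro a
          rw [flatMap_range_getD g (fun b => (List.range g.length).flatMap (fun c =>
            (List.range g.length).flatMap (fun r => [[a, b, g.getD c 0, g.getD r 0]])))]
          exact List.flatMap_congr (fun b _ => L2 a b)
        rw [flatMap_range_getD g (fun a => (List.range g.length).flatMap (fun b =>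
          (List.range g.length).flatMap (fun c =>
            (List.range g.length).flatMap (fun r => [[a, g.getD b 0, g.getD c 0, g.getD r 0]]))))]
        exact List.flatMap_congr (fun a _ => L3 a)

-- ===== VERDICT (by name: the statement is the Claim_ definition above) =====
theorem gridinput_spec : Claim_equal_gridinput := by
  intro U size _ _
  unfold Spec_gridinput gridinput gridinput_alt
  rw [gridA0_eq]
  exact (decode_eq _).symm
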